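-- pv_equiv track=rewrite | github.com/tortagel/advent-of-code-2020 | day19.py | count_sub_pattern
-- ===== SOURCE A (Python) =====
-- def count_sub_pattern(regex):
--     i = open_parentheses = sub_pattern = 1
--     while open_parentheses > 0:
--         if regex[i] == ')':
--             open_parentheses -= 1
--         elif regex[i] == '(':
--             open_parentheses += 1
--             sub_pattern += 1
--         i += 1
--     return sub_pattern
-- ===== SOURCE B (Python) =====
-- def count_sub_pattern(regex):
--     # Pass 1: find the index of the ')' that closes the group assumed open
--     # before index 1, tracking only the depth.
--     depth = 0
--     j = 1
--     while depth >= 0: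
--         c = regex[j]
--         if c == '(':
--             depth += 1
--         elif c == ')':
--             depth -= 1
--         j += 1
--     close = j - 1
--     # Pass 2: count the opening parens in that balanced span with a library call.
--     return 1 + regex[1:close + 1].count('(')
-- ===== Notes on version B (the rewrite author's own statement) =====
-- stated objective: alternative
-- what changed: B splits A's fused counting scan into two passes: a depth-only scan finding the matching close parenthesis, then a library str.count of opening parens over that slice; A counts them inside the same loop that tracks depth.
import Mathlib
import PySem

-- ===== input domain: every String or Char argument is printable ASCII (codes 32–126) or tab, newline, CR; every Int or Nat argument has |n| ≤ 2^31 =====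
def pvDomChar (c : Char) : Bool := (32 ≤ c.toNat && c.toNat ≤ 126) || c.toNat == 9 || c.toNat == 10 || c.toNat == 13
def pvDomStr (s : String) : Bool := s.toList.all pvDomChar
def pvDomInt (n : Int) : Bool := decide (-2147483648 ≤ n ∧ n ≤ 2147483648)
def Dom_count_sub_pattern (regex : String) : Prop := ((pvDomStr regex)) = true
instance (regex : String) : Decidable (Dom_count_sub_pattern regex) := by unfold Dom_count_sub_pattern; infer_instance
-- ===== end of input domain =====

-- B changes the decomposition: a depth-only boundary scan, then a count over the slice; same cost.

-- ===== PORT A =====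
-- A's fused while-loop; fuel = regex.length bounds the iteration count (each step
-- consumes one index starting at 1); exhausted fuel / out-of-range index = Python
-- IndexError, excluded by Pre_.
def aLoop : Nat → List Char → Nat → Int → Int → Int
  | 0, _, _, _, sub => sub
  | fuel+1, s, i, op, sub =>
    if op > 0 then
      match s[i]? with
      | none => sub
      | some c =>
        if c = ')' then aLoop fuel s (i+1) (op-1) sub
        else if c = '(' then aLoop fuel s (i+1) (op+1) (sub+1)
        else aLoop fuel s (i+1) op sub
    else sub

def count_sub_pattern (regex : String) : Int := aLoop regex.length regex.toList 1 1 1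

-- ===== PORT B =====
-- B's pass 1: depth-only scan returning the index of the matching ')'; none = IndexError.
def bClose : Nat → List Char → Nat → Int → Option Nat
  | 0, _, _, _ => none
  | fuel+1, s, j, depth =>
    if depth < 0 then some (j - 1)
    else
      match s[j]? with
      | none => none
      | some c => bClose fuel s (j+1) (depth + (if c = '(' then 1 else if c = ')' then -1 else 0))

-- B's pass 2: count the opening parens in the slice regex[1:close+1]
def count_sub_pattern_alt (regex : String) : Int :=
  match bClose regex.length regex.toList 1 0 with
  | none => 0
  | some close => 1 + (((regex.toList.drop 1).take close).count '(' : Int)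

-- ===== PRECONDITION & SPEC =====
-- net paren balance of a char list (opening minus closing)
def pvBal (l : List Char) : Int := (l.count '(' : Int) - (l.count ')' : Int)

-- A raises IndexError unless some prefix regex[1..j] closes the group assumed open
-- before index 1 (closing parens outnumber opening ones in the prefix after index 0);
-- Pre_ admits exactly the inputs where A returns.
def Pre_count_sub_pattern (regex : String) : Prop :=
  ∃ j, j < regex.length ∧ pvBal ((regex.toList.drop 1).take j) < 0
instance (regex : String) : Decidable (Pre_count_sub_pattern regex) := by
  unfold Pre_count_sub_pattern; infer_instance

def pvWitness_count_sub_pattern : String := "(a)"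

def Spec_count_sub_pattern (regex : String) (out : Int) : Prop := out = count_sub_pattern_alt regex
instance (regex : String) (out : Int) : Decidable (Spec_count_sub_pattern regex out) := by unfold Spec_count_sub_pattern; infer_instance

-- ===== CLAIM (what is proved, stated in full; the proofs are below) =====
def Claim_equal_count_sub_pattern : Prop := ∀ (regex : String), Dom_count_sub_pattern regex → Pre_count_sub_pattern regex → Spec_count_sub_pattern regex (count_sub_pattern regex)

-- ===== LEMMAS AND PROOFS =====

-- any result of bClose is ≥ j - 1
theorem bClose_ge (fuel : Nat) : ∀ (s : List Char) (j : Nat) (d : Int) (close : Nat),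
    bClose fuel s j d = some close → j - 1 ≤ close := by
  induction fuel with
  | zero => intro s j d close h; simp [bClose] at h
  | succ fuel ih =>
    intro s j d close h
    unfold bClose at h
    split at h
    · simp at h; omega
    · cases hg : s[j]? with
      | none => rw [hg] at h; simp at h
      | some c => rw [hg] at h; have := ih s (j+1) _ close h; omega

-- lockstep: A's fused loop equals accumulator + '('-count over the span B's pass-1 finds
theorem lockstep (fuel : Nat) : ∀ (s : List Char) (i : Nat) (depth sub : Int) (close : Nat),
    1 ≤ i → bClose fuel s i depth = some close →
    aLoop fuel s i (depth + 1) sub = sub + (((s.drop i).take (close + 1 - i)).count '(' : Int) := by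
  induction fuel with
  | zero => intro s i depth sub close hi h; simp [bClose] at h
  | succ fuel ih =>
    intro s i depth sub close hi h
    unfold bClose at h
    unfold aLoop
    by_cases hd : depth < 0
    · rw [if_pos hd] at h
      simp at h
      have : ¬ (depth + 1 > 0) := by omega
      rw [if_neg this]
      have : close + 1 - i = 0 := by omega
      simp [this]
    · rw [if_neg hd] at h
      have hop : depth + 1 > 0 := by omega
      rw [if_pos hop]
      cases hg : s[i]? with
      | none => rw [hg] at h; simp at h
      | some c =>
        rw [hg] at h
        dsimp only at h ⊢
        have hic : i ≤ close := by
          have := bClose_ge fuel s (i+1) _ close h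
          omega
        obtain ⟨hlen, hci⟩ := List.getElem?_eq_some_iff.mp hg
        have hdrop : s.drop i = c :: s.drop (i+1) := by
          rw [List.drop_eq_getElem_cons hlen, hci]
        have htake : close + 1 - i = (close + 1 - (i+1)) + 1 := by omega
        rw [hdrop, htake, List.take_succ_cons, List.count_cons]
        by_cases hc1 : c = ')'
        · rw [if_pos hc1]
          have hc2 : ¬ (c = '(') := by rw [hc1]; decide
          have : depth + 1 - 1 = (depth + (if c = '(' then 1 else if c = ')' then -1 else 0)) + 1 := by
            rw [if_neg hc2, if_pos hc1]; ring
          rw [this]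
          rw [ih s (i+1) _ sub close (by omega) h]
          simp [hc2]
        · rw [if_neg hc1]
          by_cases hc2 : c = '('
          · rw [if_pos hc2]
            have : depth + 1 + 1 = (depth + (if c = '(' then 1 else if c = ')' then -1 else 0)) + 1 := by
              rw [if_pos hc2]
            rw [this]
            rw [ih s (i+1) _ (sub+1) close (by omega) h]
            simp only [hc2, beq_self_eq_true, if_pos]
            push_cast
            ring
          · rw [if_neg hc2]
            have : depth + 1 = (depth + (if c = '(' then 1 else if c = ')' then -1 else 0)) + 1 := by
              rw [if_neg hc2, if_neg hc1]; ring
            rw [this]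
            rw [ih s (i+1) _ sub close (by omega) h]
            have : (c == '(') = false := by simp [hc2]
            simp [this]

theorem pvBal_cons (c : Char) (t : List Char) :
    pvBal (c :: t) = (if c = '(' then 1 else if c = ')' then -1 else 0) + pvBal t := by
  unfold pvBal
  by_cases h1 : c = '('
  · have h2 : ¬ (c = ')') := by rw [h1]; decide
    simp [h1]; ring
  · by_cases h2 : c = ')'
    · simp [h2]; ring
    · simp [List.count_cons, h1, h2]

-- B's pass-1 terminates with some result whenever a closing prefix exists
theorem bClose_total (fuel : Nat) : ∀ (s : List Char) (i : Nat) (depth : Int),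
    i ≤ s.length → s.length + 1 - i ≤ fuel →
    (depth < 0 ∨ ∃ j, i ≤ j ∧ j < s.length ∧ depth + pvBal ((s.drop i).take (j + 1 - i)) < 0) →
    ∃ close, bClose fuel s i depth = some close := by
  induction fuel with
  | zero => intro s i depth hil hf _; omega
  | succ fuel ih =>
    intro s i depth hil hf hC
    unfold bClose
    by_cases hd : depth < 0
    · exact ⟨i - 1, by rw [if_pos hd]⟩
    · rw [if_neg hd]
      rcases hC with h | ⟨j, hij, hjl, hb⟩
      · omega
      have hlen : i < s.length := by omega
      cases hg : s[i]? with
      | none => exact absurd hg (by simp [List.getElem?_eq_getElem hlen])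
      | some c =>
        dsimp only
        obtain ⟨_, hci⟩ := List.getElem?_eq_some_iff.mp hg
        have hdrop : s.drop i = c :: s.drop (i+1) := by
          rw [List.drop_eq_getElem_cons hlen, hci]
        apply ih s (i+1) _ (by omega) (by omega)
        by_cases hji : j = i
        · left
          subst hji
          have h1 : j + 1 - j = 1 := by omega
          rw [h1, hdrop, List.take_succ_cons, List.take_zero, pvBal_cons] at hb
          simp [pvBal] at hb
          omega
        · right
          refine ⟨j, by omega, hjl, ?_⟩
          have h1 : j + 1 - i = (j + 1 - (i+1)) + 1 := by omega
          rw [h1, hdrop, List.take_succ_cons, pvBal_cons] at hb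
          omega

-- ===== VERDICT (by name: the statement is the Claim_ definition above) =====
theorem count_sub_pattern_spec : Claim_equal_count_sub_pattern := by
  intro regex _ hpre
  unfold Spec_count_sub_pattern count_sub_pattern count_sub_pattern_alt
  obtain ⟨j, hjl, hb⟩ := hpre
  have hj1 : 1 ≤ j := by
    rcases Nat.eq_zero_or_pos j with h0 | h
    · subst h0; simp [pvBal] at hb
    · exact h
  have hlen : regex.length = regex.toList.length := (@String.length_toList regex).symm
  rw [hlen] at hjl ⊢
  obtain ⟨close, hclose⟩ := bClose_total regex.toList.length regex.toList 1 0
    (by omega) (by omega)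
    (Or.inr ⟨j, hj1, hjl, by simpa using hb⟩)
  rw [hclose]
  have := lockstep regex.toList.length regex.toList 1 0 1 close (by omega) hclose
  simpa using this
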